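-- pv_equiv track=rewrite | github.com/alexztorm/study_projects | yandex/algorithms_training_6/homework_2/task_E.py | delete_medians
-- ===== SOURCE A (Python) =====
-- def delete_medians(n: int, numbers: list[int]) -> list[int]:
--     ans = []
--
--     numbers.sort()
--
--     if n % 2 == 0:
--         left = n // 2 - 1
--         right = n // 2
--     else:
--         ans.append(numbers[n // 2])
--         left = n // 2 - 1
--         right = n // 2 + 1
--
--     while left > -1 and right < n:
--         if numbers[left] <= numbers[right]:
--             ans.append(numbers[left])
--             ans.append(numbers[right])
--         else:
--             ans.append(numbers[right])
--             ans.append(numbers[left])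
--         left -= 1
--         right += 1
--
--     while left > -1:
--         ans.append(numbers[left])
--         left -= 1
--
--     while right < n:
--         ans.append(numbers[right])
--         right += 1
--
--     return ans
-- ===== SOURCE B (Python) =====
-- def delete_medians(n: int, numbers: list[int]) -> list[int]:
--     numbers.sort()
--     out = []
--     lo, hi = 0, n - 1
--     # consume the sorted range outside-in: largest, smallest, next outer pair, ...
--     while lo < hi:
--         out.append(numbers[hi])
--         out.append(numbers[lo])
--         lo += 1
--         hi -= 1
--     if lo == hi:
--         out.append(numbers[lo])
--     return out[::-1]
-- ===== Notes on version B (the rewrite author's own statement) =====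
-- stated objective: simpler
-- what changed: Replaces A's median-index setup (parity branch on n, two symmetric counters walking outward from the middle, an element comparison, and two drain loops) with a single loop that consumes the sorted range from the OUTSIDE ends inward and reverses the built list once at the end; no median index, no parity branch, no comparison, no drain loops.
-- outside the precondition, e.g. on delete_medians(-3, [1, 2, 3]): A returns [2], B returns []; on delete_medians(3, [1, 2]): A raises IndexError, B raises IndexError
import Mathlib
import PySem

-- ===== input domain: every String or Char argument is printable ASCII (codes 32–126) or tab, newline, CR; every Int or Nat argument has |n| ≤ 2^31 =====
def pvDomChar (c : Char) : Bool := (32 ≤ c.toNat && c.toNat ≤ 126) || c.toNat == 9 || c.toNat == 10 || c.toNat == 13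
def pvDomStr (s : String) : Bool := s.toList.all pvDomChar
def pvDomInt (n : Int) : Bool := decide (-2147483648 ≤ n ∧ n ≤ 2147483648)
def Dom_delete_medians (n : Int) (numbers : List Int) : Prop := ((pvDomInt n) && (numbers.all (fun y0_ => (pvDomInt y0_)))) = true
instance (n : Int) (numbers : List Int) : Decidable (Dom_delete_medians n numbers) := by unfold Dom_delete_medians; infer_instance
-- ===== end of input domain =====

-- B replaces A's median-index two-counter loop (parity branch, comparison, two drain loops)
-- by a recursion consuming the sorted range outside-in, reversed once at the end; same return value.
-- Both A and B sort `numbers` in place in Python; the equivalence proved is about the return value.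


-- ===== PORT A =====
-- third `while right < n` drain loop of A
def pvTailR (s : List Int) (n right : Int) : List Int :=
  if right < n then
    PySem.List.pyGetD s right 0 :: pvTailR s n (right + 1)
  else []
termination_by (n - right).toNat
decreasing_by omega

-- second `while left > -1` drain loop of A
def pvTailL (s : List Int) (left : Int) : List Int :=
  if left > -1 then
    PySem.List.pyGetD s left 0 :: pvTailL s (left - 1)
  else []
termination_by (left + 1).toNat
decreasing_by omega

-- main `while left > -1 and right < n` loop of A, followed by the two drain loops
def pvLoopA (s : List Int) (n left right : Int) : List Int :=
  if _h : left > -1 ∧ right < n then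
    (if PySem.List.pyGetD s left 0 ≤ PySem.List.pyGetD s right 0 then
      [PySem.List.pyGetD s left 0, PySem.List.pyGetD s right 0]
     else
      [PySem.List.pyGetD s right 0, PySem.List.pyGetD s left 0])
    ++ pvLoopA s n (left - 1) (right + 1)
  else pvTailL s left ++ pvTailR s n right
termination_by (left + 1).toNat
decreasing_by omega

def delete_medians (n : Int) (numbers : List Int) : List Int :=
  let s := PySem.List.sorted numbers (fun x => x) false
  if PySem.Int.mod n 2 = 0 then
    pvLoopA s n (PySem.Int.floordiv n 2 - 1) (PySem.Int.floordiv n 2)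
  else
    PySem.List.pyGetD s (PySem.Int.floordiv n 2) 0 ::
      pvLoopA s n (PySem.Int.floordiv n 2 - 1) (PySem.Int.floordiv n 2 + 1)

-- ===== PORT B =====
-- the `while lo < hi` loop of Source B (state: the accumulator `out` and the two ends),
-- followed by the `if lo == hi` middle append
def pvLoopB (s : List Int) (out : List Int) (lo hi : Int) : List Int :=
  if _h : lo < hi then
    pvLoopB s (out ++ [PySem.List.pyGetD s hi 0, PySem.List.pyGetD s lo 0]) (lo + 1) (hi - 1)
  else if lo = hi then out ++ [PySem.List.pyGetD s lo 0]
  else out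
termination_by (hi + 1 - lo).toNat
decreasing_by omega

-- `out[::-1]` is List.reverse (PySem.List.slice?_none_none_neg_one)
def delete_medians_alt (n : Int) (numbers : List Int) : List Int :=
  let s := PySem.List.sorted numbers (fun x => x) false
  (pvLoopB s [] 0 (n - 1)).reverse

-- ===== PRECONDITION & SPEC =====
-- n is the element count of `numbers`; Pre_ excludes n > len(numbers), where A raises
-- IndexError, and negative n, a meaningless count on which A's mix of an empty result and
-- negative-index lookups is an accident of its implementation.
def Pre_delete_medians (n : Int) (numbers : List Int) : Prop :=
  0 ≤ n ∧ n ≤ (numbers.length : Int)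
instance (n : Int) (numbers : List Int) : Decidable (Pre_delete_medians n numbers) := by
  unfold Pre_delete_medians; infer_instance

def pvWitness_delete_medians : Int × List Int := (5, [3, 1, 4, 1, 5])

def Spec_delete_medians (n : Int) (numbers : List Int) (out : List Int) : Prop := out = delete_medians_alt n numbers
instance (n : Int) (numbers : List Int) (out : List Int) : Decidable (Spec_delete_medians n numbers out) := by unfold Spec_delete_medians; infer_instance

-- ===== CLAIM (what is proved, stated in full; the proofs are below) =====
def Claim_equal_delete_medians : Prop := ∀ (n : Int) (numbers : List Int), Dom_delete_medians n numbers → Pre_delete_medians n numbers → Spec_delete_medians n numbers (delete_medians n numbers)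

-- ===== LEMMAS AND PROOFS =====

-- proof-only recursive rendering of Source B's loop result (out = [] case), easier to reason about
def pvOutward (s : List Int) (lo hi : Int) : List Int :=
  if _h : lo > hi then []
  else if lo = hi then [PySem.List.pyGetD s lo 0]
  else [PySem.List.pyGetD s hi 0, PySem.List.pyGetD s lo 0] ++ pvOutward s (lo + 1) (hi - 1)
termination_by (hi + 1 - lo).toNat
decreasing_by omega

-- Source B's accumulator loop appends exactly pvOutward's list
lemma pvLoopB_eq_outward (c : Nat) : ∀ (s out : List Int) (lo hi : Int),
    (hi + 1 - lo).toNat ≤ c → pvLoopB s out lo hi = out ++ pvOutward s lo hi := by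
  induction c with
  | zero =>
    intro s out lo hi hc
    rw [pvLoopB, pvOutward, dif_neg (show ¬ lo < hi by omega), dif_pos (show lo > hi by omega),
      if_neg (show ¬ lo = hi by omega)]
    simp
  | succ k ih =>
    intro s out lo hi hc
    rw [pvLoopB, pvOutward]
    by_cases hgt : lo > hi
    · rw [dif_neg (show ¬ lo < hi by omega), dif_pos hgt,
        if_neg (show ¬ lo = hi by omega)]
      simp
    · by_cases heq : lo = hi
      · rw [dif_neg (show ¬ lo < hi by omega), dif_neg hgt, if_pos heq, if_pos heq]
      · have hlt : lo < hi := by omega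
        rw [dif_pos hlt, dif_neg hgt, if_neg heq,
          ih s (out ++ [PySem.List.pyGetD s hi 0, PySem.List.pyGetD s lo 0]) (lo + 1) (hi - 1)
            (by omega)]
        simp

lemma pvTailL_neg (s : List Int) (left : Int) (h : ¬ left > -1) : pvTailL s left = [] := by
  rw [pvTailL]; simp [h]

lemma pvTailR_ge (s : List Int) (n right : Int) (h : ¬ right < n) : pvTailR s n right = [] := by
  rw [pvTailR]; simp [h]

-- A's main loop, run with counters that exhaust simultaneously on a sorted list,
-- is the interleaving of the reversed lower slice with the upper slice.
lemma pvLoopA_eq_zip (c : Nat) : ∀ (s : List Int) (n left right : Int),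
    s.Pairwise (· ≤ ·) →
    left + 1 = (c : Int) → n - right = left + 1 → n ≤ (s.length : Int) → left < right →
    pvLoopA s n left right =
      ((s.take (left + 1).toNat).reverse.zip (s.drop right.toNat)).flatMap
        (fun q => [q.1, q.2]) := by
  induction c with
  | zero =>
    intro s n left right hpair hc hnr hlen hlr
    have hl : left = -1 := by omega
    subst hl
    rw [pvLoopA]
    have hcond : ¬ ((-1 : Int) > -1 ∧ right < n) := by omega
    rw [dif_neg hcond, pvTailL_neg s (-1) (by omega), pvTailR_ge s n right (by omega)]
    simp
  | succ k ih =>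
    intro s n left right hpair hc hnr hlen hlr
    have hl0 : 0 ≤ left := by omega
    have hrlt : right < n := by omega
    have hrlen : right.toNat < s.length := by omega
    have hllen : left.toNat < s.length := by omega
    have hlr' : left.toNat < right.toNat := by omega
    have hle : s[left.toNat] ≤ s[right.toNat] :=
      (List.pairwise_iff_getElem.mp hpair) left.toNat right.toNat hllen hrlen hlr'
    have hgl : PySem.List.pyGetD s left 0 = s[left.toNat] :=
      PySem.List.pyGetD_eq_getElem s 0 hl0 (by omega)
    have hgr : PySem.List.pyGetD s right 0 = s[right.toNat] :=
      PySem.List.pyGetD_eq_getElem s 0 (by omega) (by omega)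
    rw [pvLoopA]
    have hcond : left > -1 ∧ right < n := ⟨by omega, hrlt⟩
    have htake : (s.take (left + 1).toNat).reverse
        = s[left.toNat] :: (s.take left.toNat).reverse := by
      have : (left + 1).toNat = left.toNat + 1 := by omega
      rw [this, List.take_add_one, List.reverse_append]
      simp [List.getElem?_eq_getElem hllen]
    have hdrop : s.drop right.toNat = s[right.toNat] :: s.drop (right.toNat + 1) := by
      exact List.drop_eq_getElem_cons hrlen
    have hih := ih s n (left - 1) (right + 1) hpair (by omega) (by omega) (by omega) (by omega)
    simp only [hcond, hgl, hgr, if_pos hle]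
    rw [hih, htake, hdrop]
    have h1 : (left - 1 + 1).toNat = left.toNat := by
      omega
    have h2 : (right + 1).toNat = right.toNat + 1 := by omega
    rw [h1, h2]
    simp only [List.zip_cons_cons, List.flatMap_cons, List.cons_append, List.nil_append]
    simp

-- zip ignores the part of its right list beyond the left list's length
lemma zip_trunc : ∀ (xs : List Int) (ys : List Int) (p : Nat), xs.length ≤ p →
    xs.zip (ys.take p) = xs.zip ys := by
  intro xs
  induction xs with
  | nil => intro ys p _; simp
  | cons x xs ih =>
    intro ys p hp
    cases ys with
    | nil => simp
    | cons y ys =>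
      cases p with
      | zero => simp at hp
      | succ q => simp only [List.take_succ_cons, List.zip_cons_cons, ih ys q (by simpa using hp)]

lemma interleave_append (x y : List Int) (u v : Int) (h : x.length = y.length) :
    (((x ++ [u]).zip (y ++ [v])).flatMap (fun q => [q.1, q.2]))
      = ((x.zip y).flatMap (fun q => [q.1, q.2])) ++ [u, v] := by
  rw [List.zip_append h]
  simp

-- reversing an interleave of equal-length lists interleaves the reversed lists swapped
lemma interleave_reverse : ∀ (a b : List Int), a.length = b.length →
    ((a.zip b).flatMap (fun q => [q.1, q.2])).reverse
      = ((b.reverse.zip a.reverse).flatMap (fun q => [q.1, q.2])) := by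
  intro a
  induction a with
  | nil =>
    intro b h
    cases b with
    | nil => simp
    | cons y ys => simp at h
  | cons x xs ih =>
    intro b h
    cases b with
    | nil => simp at h
    | cons y ys =>
      have hlen : xs.length = ys.length := by simpa using h
      simp only [List.zip_cons_cons, List.flatMap_cons, List.reverse_cons]
      rw [interleave_append _ _ _ _ (by simp [hlen]), ← ih ys hlen]
      simp

-- characterization of pvOutward: interleave of the top-p segment (reversed) with the
-- bottom-p segment, plus the single middle element when the range length is odd
lemma pvOutward_eq (p : Nat) : ∀ (s : List Int) (lo hi : Int),
    0 ≤ lo → hi < (s.length : Int) →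
    (hi + 1 - lo = 2 * p ∨ hi + 1 - lo = 2 * p + 1) →
    pvOutward s lo hi =
      ((((s.drop (hi + 1 - p).toNat).take p).reverse).zip ((s.drop lo.toNat).take p)).flatMap
          (fun q => [q.1, q.2])
        ++ (if hi + 1 - lo = 2 * p + 1 then [PySem.List.pyGetD s (lo + p) 0] else []) := by
  induction p with
  | zero =>
    intro s lo hi hlo hhi hpar
    rcases hpar with h0 | h1
    · rw [pvOutward, dif_pos (by omega)]
      rw [if_neg (by omega)]
      simp
    · have hle : lo = hi := by omega
      rw [pvOutward, dif_neg (by omega), if_pos hle]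
      rw [if_pos (by omega)]
      simp
  | succ p ih =>
    intro s lo hi hlo hhi hpar
    have hlt : lo < hi := by omega
    have hloN : lo.toNat < s.length := by omega
    have hhiN : hi.toNat < s.length := by omega
    rw [pvOutward, dif_neg (by omega), if_neg (by omega)]
    have hih := ih s (lo + 1) (hi - 1) (by omega) (by omega) (by omega)
    rw [hih]
    have hd : (hi - 1 + 1 - (p : Int)).toNat = (hi + 1 - ((p : Nat) + 1 : Nat)).toNat := by
      push_cast; omega
    have hup : (s.drop (hi + 1 - ((p : Nat) + 1 : Nat)).toNat).take (p + 1)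
        = (s.drop (hi + 1 - ((p : Nat) + 1 : Nat)).toNat).take p ++ [s[hi.toNat]] := by
      rw [List.take_add_one, List.getElem?_drop]
      rw [show (hi + 1 - ((p : Nat) + 1 : Nat)).toNat + p = hi.toNat from by push_cast; omega]
      rw [List.getElem?_eq_getElem hhiN]
      simp
    have hlow : (s.drop lo.toNat).take (p + 1)
        = s[lo.toNat] :: (s.drop ((lo + 1 : Int)).toNat).take p := by
      rw [show ((lo + 1 : Int)).toNat = lo.toNat + 1 from by omega,
          List.drop_eq_getElem_cons hloN, List.take_succ_cons]
    have hgl : PySem.List.pyGetD s lo 0 = s[lo.toNat] :=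
      PySem.List.pyGetD_eq_getElem s 0 hlo (by omega)
    have hgh : PySem.List.pyGetD s hi 0 = s[hi.toNat] :=
      PySem.List.pyGetD_eq_getElem s 0 (by omega) (by omega)
    rw [hup, hlow, hgl, hgh, hd, List.reverse_append]
    simp only [List.reverse_cons, List.reverse_nil, List.nil_append,
      List.zip_cons_cons, List.flatMap_cons, List.cons_append, List.nil_append]
    rcases hpar with h2 | h3
    · rw [if_neg (by omega), if_neg (by push_cast; omega)]
    · rw [if_pos (by omega), if_pos (by push_cast; omega)]
      rw [show lo + 1 + (p : Int) = lo + ((p : Nat) + 1 : Nat) from by push_cast; ring]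

lemma sorted_len (numbers : List Int) :
    (PySem.List.sorted numbers (fun x => x) false).length = numbers.length :=
  PySem.List.length_sorted numbers (fun x => x) false

-- ===== VERDICT (by name: the statement is the Claim_ definition above) =====
theorem delete_medians_spec : Claim_equal_delete_medians := by
  intro n numbers _hdom hpre
  obtain ⟨hn0, hnlen⟩ := hpre
  unfold Spec_delete_medians delete_medians delete_medians_alt
  set s := PySem.List.sorted numbers (fun x => x) false with hs
  dsimp only
  have hpair : s.Pairwise (· ≤ ·) := by
    simpa using PySem.List.sorted_pairwise numbers (fun x => x)
  have hslen : (s.length : Int) = (numbers.length : Int) := by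
    exact_mod_cast congrArg Nat.cast (sorted_len numbers)
  have hmid : PySem.Int.floordiv n 2 = n / 2 :=
    PySem.Int.floordiv_eq_ediv_of_pos (by omega)
  have hmod : PySem.Int.mod n 2 = n % 2 :=
    PySem.Int.mod_eq_emod_of_pos (by omega)
  have hmid0 : 0 ≤ n / 2 := by omega
  set p : Nat := (n / 2).toNat with hp
  have hpI : ((p : Nat) : Int) = n / 2 := by omega
  -- B via the outward characterization
  rw [pvLoopB_eq_outward (n - 1 + 1 - 0).toNat s [] 0 (n - 1) (Nat.le_refl _), List.nil_append]
  have hB := pvOutward_eq p s 0 (n - 1) (le_refl 0) (by omega) (by omega)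
  rw [show ((0 : Int)).toNat = 0 from rfl, List.drop_zero] at hB
  have hUlen : ((s.drop (n - 1 + 1 - (p : Int)).toNat).take p).length = p := by
    simp only [List.length_take, List.length_drop]
    omega
  have hLlen : (s.take p).length = p := by
    simp only [List.length_take]; omega
  have hrev := interleave_reverse ((s.drop (n - 1 + 1 - (p : Int)).toNat).take p).reverse
    (s.take p) (by simp; omega)
  rw [hB, List.reverse_append, hrev, List.reverse_reverse]
  by_cases hev : n % 2 = 0
  · have hn2 : n = 2 * (n / 2) := by omega
    simp only [hmod, hmid, if_pos hev]
    rw [pvLoopA_eq_zip p s n (n / 2 - 1) (n / 2) hpair (by omega) (by omega)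
      (by omega) (by omega)]
    rw [if_neg (by omega), List.reverse_nil, List.nil_append]
    rw [show (n - 1 + 1 - (p : Int)).toNat = (n / 2).toNat from by omega]
    rw [show (n / 2 - 1 + 1).toNat = p from by omega]
    rw [← zip_trunc (s.take p).reverse (s.drop (n / 2).toNat) p
      (by simp [hLlen] : ((s.take p).reverse).length ≤ p)]
  · have hn2 : n = 2 * (n / 2) + 1 := by omega
    simp only [hmod, hmid, if_neg hev]
    rw [pvLoopA_eq_zip p s n (n / 2 - 1) (n / 2 + 1) hpair (by omega) (by omega)
      (by omega) (by omega)]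
    rw [if_pos (by omega)]
    rw [show (n - 1 + 1 - (p : Int)).toNat = (n / 2 + 1).toNat from by omega]
    rw [show (n / 2 - 1 + 1).toNat = p from by omega]
    rw [show (0 : Int) + (p : Int) = n / 2 from by omega]
    rw [zip_trunc (s.take p).reverse (s.drop (n / 2 + 1).toNat) p
      (by simp [hLlen] : ((s.take p).reverse).length ≤ p)]
    simp
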